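-- pv_equiv track=rewrite | github.com/CPUgod-ai/AFD-python-y-c | AFD (1).py | es_id
-- ===== SOURCE A (Python) =====
-- def es_id(cadena):
--     if len(cadena) == 0:
--         return False
--
--     def es_primera(caracter):
--         return ('A' <= caracter <= 'Z') or ('a' <= caracter <= 'z')
--
--     def es_minuscula(caracter):
--         return 'a' <= caracter <= 'z'
--
--     def es_digito(caracter):
--         return '0' <= caracter <= '9'
--
--     if not es_primera(cadena[0]):
--         return False
--
--     estado = 1
--     indice = 1
--
--     while indice < len(cadena):
--         caracter = cadena[indice]
--
--         if estado == 1: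
--             if es_minuscula(caracter):
--                 estado = 2
--             else:
--                 return False
--         elif estado == 2:
--             if es_digito(caracter):
--                 estado = 1
--             else:
--                 return False
--
--         indice += 1
--
--     return estado == 1
-- ===== SOURCE B (Python) =====
-- def es_id(cadena):
--     if not cadena:
--         return False
--     c0 = cadena[0]
--     if not ('A' <= c0 <= 'Z' or 'a' <= c0 <= 'z'):
--         return False
--     return _pares(cadena[1:])
--
-- def _pares(s):
--     # accepts exactly sequences of complete lowercase-letter + digit pairs
--     if s == "":
--         return True
--     if len(s) == 1:
--         return False
--     return 'a' <= s[0] <= 'z' and '0' <= s[1] <= '9' and _pares(s[2:])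
-- ===== Notes on version B (the rewrite author's own statement) =====
-- stated objective: simpler
-- what changed: Replace the explicit two-state DFA loop (estado 1/2 with a state variable) by a direct recursive check that the tail after the leading letter is a sequence of complete lowercase+digit pairs.
import Mathlib
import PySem

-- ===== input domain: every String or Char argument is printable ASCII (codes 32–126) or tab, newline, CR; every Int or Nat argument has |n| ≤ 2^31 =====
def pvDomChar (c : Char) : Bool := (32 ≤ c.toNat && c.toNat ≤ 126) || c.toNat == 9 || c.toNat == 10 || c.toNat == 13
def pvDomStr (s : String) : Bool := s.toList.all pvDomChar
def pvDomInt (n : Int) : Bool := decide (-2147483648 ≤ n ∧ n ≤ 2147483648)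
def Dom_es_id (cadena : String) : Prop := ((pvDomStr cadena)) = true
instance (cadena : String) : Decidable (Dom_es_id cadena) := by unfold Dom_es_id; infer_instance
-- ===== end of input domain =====

-- B replaces A's explicit two-state DFA loop by a direct recursive pair check (simpler decomposition).


-- ===== PORT A =====
def esPrimeraA (c : Char) : Bool := decide (('A' ≤ c ∧ c ≤ 'Z') ∨ ('a' ≤ c ∧ c ≤ 'z'))
def esMinusculaA (c : Char) : Bool := decide ('a' ≤ c ∧ c ≤ 'z')
def esDigitoA (c : Char) : Bool := decide ('0' ≤ c ∧ c ≤ '9')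

-- the while loop over the remaining characters, carrying 'estado'
def loopA : List Char → Int → Bool
  | [], estado => estado == 1
  | c :: cs, estado =>
    if estado == 1 then
      if esMinusculaA c then loopA cs 2 else false
    else if estado == 2 then
      if esDigitoA c then loopA cs 1 else false
    else loopA cs estado   -- unreachable in Python (no else branch: estado unchanged, indice += 1)

def es_id (cadena : String) : Bool :=
  match cadena.toList with
  | [] => false
  | c0 :: rest => if !esPrimeraA c0 then false else loopA rest 1

-- ===== PORT B =====
def paresB : List Char → Bool
  | [] => true
  | [_] => false
  | a :: b :: rest => decide ('a' ≤ a ∧ a ≤ 'z') && decide ('0' ≤ b ∧ b ≤ '9') && paresB rest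

def es_id_alt (cadena : String) : Bool :=
  match cadena.toList with
  | [] => false
  | c0 :: rest =>
    if !(decide (('A' ≤ c0 ∧ c0 ≤ 'Z') ∨ ('a' ≤ c0 ∧ c0 ≤ 'z'))) then false
    else paresB rest

-- ===== PRECONDITION & SPEC =====
def Spec_es_id (cadena : String) (out : Bool) : Prop := out = es_id_alt cadena
instance (cadena : String) (out : Bool) : Decidable (Spec_es_id cadena out) := by unfold Spec_es_id; infer_instance

-- ===== CLAIM (what is proved, stated in full; the proofs are below) =====
def Claim_equal_es_id : Prop := ∀ (cadena : String), Dom_es_id cadena → Spec_es_id cadena (es_id cadena)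

-- ===== LEMMAS AND PROOFS =====

theorem loopA_eq_paresB (cs : List Char) : loopA cs 1 = paresB cs := by
  induction cs using paresB.induct with
  | case1 => rfl
  | case2 a =>
    simp [loopA, paresB, esMinusculaA]
  | case3 a b rest ih =>
    simp only [loopA, paresB, esMinusculaA, esDigitoA, ih]
    simp [Bool.and_assoc]

-- ===== VERDICT (by name: the statement is the Claim_ definition above) =====
theorem es_id_spec : Claim_equal_es_id := by
  intro cadena _
  unfold Spec_es_id es_id es_id_alt
  cases h : cadena.toList with
  | nil => rfl
  | cons c0 rest =>
    simp [esPrimeraA, loopA_eq_paresB]
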